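-- pv_equiv track=rewrite | github.com/fmfi-compbio/mcdp2 | src/mcdp2/common/io.py | create_context_from_superset
-- ===== SOURCE A (Python) =====
-- def _fill_background_context(raw_intervals, chromosome_lengths):
--     BACKGROUND_SYMBOL = "__B"
--     result = {name: [] for name, length in chromosome_lengths}
--     for name, length in chromosome_lengths:
--         genome_intervals = sorted(raw_intervals.get(name, []), key=lambda x: (x[1], x[2]))
--         for ctx, b, e in genome_intervals:
--             if len(result[name]) == 0:
--                 if b == 0:
--                     result[name].append((ctx, b, e))
--                 else:
--                     result[name].append((BACKGROUND_SYMBOL, 0, b))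
--                     result[name].append((ctx, b, e))
--             else:
--                 prev_ctx, prev_b, prev_e = result[name][-1]
--                 if prev_e < b:
--                     result[name].append((BACKGROUND_SYMBOL, prev_e, b))
--                     result[name].append((ctx, b, e))
--                 elif prev_e == b and prev_ctx != ctx:
--                     result[name].append((ctx, b, e))
--                 elif prev_e >= b and prev_ctx == ctx:
--                     result[name][-1] = (ctx, prev_b, max(prev_e, e))
--                 else:
--                     # overlap of intervals with different contexts
--                     raise ValueError("Context intervals with different names cannot overlap!"
--                                      f" (chromosome {name}, interval [{b}, {e}); {prev_ctx=}, {prev_b=}, {prev_e=})")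
--         if len(result[name]) == 0:
--             result[name].append((BACKGROUND_SYMBOL, 0, length))
--         elif (last := result[name][-1][2]) < length:
--             result[name].append((BACKGROUND_SYMBOL, last, length))
--         elif result[name][-1][2] == length:
--             pass  # nothing to do here
--         else:
--             # overflow of the genome length
--             raise ValueError(f"Context intervals should not overflow "
--                              f"the original genome length! (chromosome {name})")
--     return result
--
-- def create_context_from_superset(superset, chromosome_lengths, separate_models=False):
--     raw_context_intervals = {chrname: [] for chrname, _ in chromosome_lengths}
--     for c, b, e in superset:
--         if separate_models:
--             raw_context_intervals[c].append((f'{c}_superset', b, e))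
--         else:
--             raw_context_intervals[c].append((f'superset', b, e))
--
--     context = _fill_background_context(raw_context_intervals, chromosome_lengths)
--     return context
-- ===== SOURCE B (Python) =====
-- def create_context_from_superset(superset, chromosome_lengths, separate_models=False):
--     by_chrom = {name: [] for name, _ in chromosome_lengths}
--     for c, b, e in superset:
--         by_chrom[c].append((b, e))
--     context = {}
--     for name, length in chromosome_lengths:
--         ctx = f'{name}_superset' if separate_models else 'superset'
--         # pass 1: consolidate sorted raw intervals into merged segments
--         merged = []
--         for b, e in sorted(by_chrom[name]):
--             if merged and b <= merged[-1][1]: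
--                 pb, pe = merged[-1]
--                 merged[-1] = (pb, max(pe, e))
--             else:
--                 merged.append((b, e))
--         # pass 2: interleave background fillers over the gaps
--         segs = []
--         pos = 0
--         for b, e in merged:
--             if pos < b:
--                 segs.append(('__B', pos, b))
--             segs.append((ctx, b, e))
--             pos = e
--         if pos < length or not merged:
--             segs.append(('__B', pos, length))
--         context[name] = segs
--     return context
-- ===== Notes on version B (the rewrite author's own statement) =====
-- stated objective: alternative
-- what changed: A interleaves background-filling, gap detection and merging in one four-branch scan that mutates a pre-initialized dict of lists; B decomposes the work per chromosome into a standard interval-merge pass over the sorted (start,end) pairs followed by a separate gap-filling pass that inserts '__B' fillers and the trailing segment.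
import Mathlib
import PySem

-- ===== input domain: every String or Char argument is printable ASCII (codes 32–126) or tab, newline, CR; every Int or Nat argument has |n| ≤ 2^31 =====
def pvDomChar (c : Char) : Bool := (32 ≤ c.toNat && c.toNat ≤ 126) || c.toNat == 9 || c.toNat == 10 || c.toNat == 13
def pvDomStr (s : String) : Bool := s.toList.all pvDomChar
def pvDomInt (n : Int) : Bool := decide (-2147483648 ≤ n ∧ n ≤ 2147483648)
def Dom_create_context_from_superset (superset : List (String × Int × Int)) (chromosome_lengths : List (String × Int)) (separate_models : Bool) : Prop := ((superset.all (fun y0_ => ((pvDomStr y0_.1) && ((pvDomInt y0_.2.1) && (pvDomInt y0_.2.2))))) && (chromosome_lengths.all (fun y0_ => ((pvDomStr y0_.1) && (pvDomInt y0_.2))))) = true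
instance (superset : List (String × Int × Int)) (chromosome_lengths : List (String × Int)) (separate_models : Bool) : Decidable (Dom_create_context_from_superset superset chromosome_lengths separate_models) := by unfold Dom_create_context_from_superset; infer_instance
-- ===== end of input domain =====

-- B re-decomposes A's single interleaved filling scan into an interval-merge pass followed by a
-- separate gap-filling pass (objective: alternative; same asymptotic cost).

-- ===== PORT A =====
-- f'{c}_superset' / f'superset'
def pvLabel (sep : Bool) (c : String) : String := if sep then c ++ "_superset" else "superset"

-- one iteration of A's inner loop over a sorted genome interval (the whole interval list logic)
def pvFillStep (acc : List (String × Int × Int)) (x : String × Int × Int) : List (String × Int × Int) :=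
  match acc.getLast? with
  | none =>
      if x.2.1 = 0 then acc ++ [x]
      else acc ++ [("__B", 0, x.2.1), x]
  | some (pctx, pb, pe) =>
      if pe < x.2.1 then acc ++ [("__B", pe, x.2.1), x]
      else if pe = x.2.1 ∧ pctx ≠ x.1 then acc ++ [x]
      else if x.2.1 ≤ pe ∧ pctx = x.1 then acc.dropLast ++ [(x.1, pb, max pe x.2.2)]
      else acc  -- Python raises ValueError (overlap of different contexts); unreachable under Pre_

-- A's per-chromosome postlude (empty chromosome / trailing background / overflow check)
def pvFillFin (lst : List (String × Int × Int)) (length : Int) : List (String × Int × Int) :=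
  match lst.getLast? with
  | none => [("__B", 0, length)]
  | some (_, _, last) =>
      if last < length then lst ++ [("__B", last, length)]
      else if last = length then lst
      else lst  -- Python raises ValueError (genome-length overflow); unreachable under Pre_

def create_context_from_superset (superset : List (String × Int × Int)) (chromosome_lengths : List (String × Int)) (separate_models : Bool) : List (String × List (String × Int × Int)) :=
  -- raw_context_intervals = {chrname: [] for chrname, _ in chromosome_lengths}; then append per superset row
  let raw0 : PySem.Dict String (List (String × Int × Int)) :=
    chromosome_lengths.foldl (fun d p => d.insert p.1 []) PySem.Dict.empty
  -- raw[c].append(...): a KeyError on a chromosome absent from the dict is excluded by Pre_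
  let raw : PySem.Dict String (List (String × Int × Int)) :=
    superset.foldl (fun d x => d.modify x.1 [] (fun l => l ++ [(pvLabel separate_models x.1, x.2.1, x.2.2)])) raw0
  -- _fill_background_context: result = {name: [] for ...}; per name sort by (b, e) and scan
  let res0 : PySem.Dict String (List (String × Int × Int)) :=
    chromosome_lengths.foldl (fun d p => d.insert p.1 []) PySem.Dict.empty
  let res : PySem.Dict String (List (String × Int × Int)) :=
    chromosome_lengths.foldl (fun d p =>
      d.insert p.1 (pvFillFin
        ((PySem.List.sorted2 (raw.getD p.1 []) (fun x => x.2.1) (fun x => x.2.2)).foldl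
          pvFillStep (d.getD p.1 [])) p.2)) res0
  res.items

-- ===== PORT B =====
-- pass 1 step: standard interval merge of the sorted (start, end) pairs
def pvMergeStep (merged : List (Int × Int)) (q : Int × Int) : List (Int × Int) :=
  match merged.getLast? with
  | some (pb, pe) => if q.1 ≤ pe then merged.dropLast ++ [(pb, max pe q.2)] else merged ++ [q]
  | none => merged ++ [q]

-- pass 2: interleave '__B' fillers over the gaps, carrying (segs, pos)
def pvFillB (ctx : String) (merged : List (Int × Int)) : List (String × Int × Int) × Int :=
  merged.foldl
    (fun st q => (st.1 ++ (if st.2 < q.1 then [("__B", st.2, q.1)] else []) ++ [(ctx, q.1, q.2)], q.2))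
    ([], 0)

def pvChromB (ctx : String) (length : Int) (pairs : List (Int × Int)) : List (String × Int × Int) :=
  let merged := (PySem.List.sorted2 pairs (fun q => q.1) (fun q => q.2)).foldl pvMergeStep []
  let st := pvFillB ctx merged
  if st.2 < length ∨ merged.isEmpty then st.1 ++ [("__B", st.2, length)] else st.1

def create_context_from_superset_alt (superset : List (String × Int × Int)) (chromosome_lengths : List (String × Int)) (separate_models : Bool) : List (String × List (String × Int × Int)) :=
  let by0 : PySem.Dict String (List (Int × Int)) :=
    chromosome_lengths.foldl (fun d p => d.insert p.1 []) PySem.Dict.empty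
  let byc : PySem.Dict String (List (Int × Int)) :=
    superset.foldl (fun d x => d.modify x.1 [] (fun l => l ++ [x.2])) by0
  let out : PySem.Dict String (List (String × Int × Int)) :=
    chromosome_lengths.foldl (fun d p =>
      d.insert p.1 (pvChromB (pvLabel separate_models p.1) p.2 (byc.getD p.1 []))) PySem.Dict.empty
  out.items

-- ===== PRECONDITION & SPEC =====
-- Pre_ restricts to the natural domain: distinct chromosome names (on duplicates A's behaviour is an
-- accident of dict re-insertion and repeated processing), and intervals with 0 ≤ b and e ≤ length lying
-- on a listed chromosome (A raises KeyError on an unlisted chromosome and ValueError on overflowing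
-- intervals, and emits a negative '__B' filler for a negative start).
def Pre_create_context_from_superset (superset : List (String × Int × Int)) (chromosome_lengths : List (String × Int)) (separate_models : Bool) : Prop :=
  (chromosome_lengths.map (fun p => p.1)).Nodup ∧
  ∀ x ∈ superset, x.1 ∈ chromosome_lengths.map (fun p => p.1) ∧ 0 ≤ x.2.1 ∧
    ∀ p ∈ chromosome_lengths, p.1 = x.1 → x.2.2 ≤ p.2
instance (superset : List (String × Int × Int)) (chromosome_lengths : List (String × Int)) (separate_models : Bool) : Decidable (Pre_create_context_from_superset superset chromosome_lengths separate_models) := by unfold Pre_create_context_from_superset; infer_instance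

def pvWitness_create_context_from_superset : (List (String × Int × Int)) × (List (String × Int)) × Bool :=
  ([("c", 0, 3)], [("c", 5)], false)

def Spec_create_context_from_superset (superset : List (String × Int × Int)) (chromosome_lengths : List (String × Int)) (separate_models : Bool) (out : List (String × List (String × Int × Int))) : Prop := out = create_context_from_superset_alt superset chromosome_lengths separate_models
instance (superset : List (String × Int × Int)) (chromosome_lengths : List (String × Int)) (separate_models : Bool) (out : List (String × List (String × Int × Int))) : Decidable (Spec_create_context_from_superset superset chromosome_lengths separate_models out) := by unfold Spec_create_context_from_superset; infer_instance

-- ===== CLAIM (what is proved, stated in full; the proofs are below) =====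
def Claim_equal_create_context_from_superset : Prop := ∀ (superset : List (String × Int × Int)) (chromosome_lengths : List (String × Int)) (separate_models : Bool), Dom_create_context_from_superset superset chromosome_lengths separate_models → Pre_create_context_from_superset superset chromosome_lengths separate_models → Spec_create_context_from_superset superset chromosome_lengths separate_models (create_context_from_superset superset chromosome_lengths separate_models)

-- ===== LEMMAS AND PROOFS =====

-- every value stored by the initialising fold is [], so getD _ [] is [] on any key
theorem pvGetD_init {β : Type} (lens : List (String × Int)) (d : PySem.Dict String (List β)) (c : String)
    (h : d.getD c [] = []) :
    (lens.foldl (fun d p => d.insert p.1 ([] : List β)) d).getD c [] = [] := by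
  induction lens generalizing d with
  | nil => exact h
  | cons p t ih =>
      simp only [List.foldl_cons]
      exact ih _ (by rw [PySem.Dict.getD_insert]; split <;> simp [h])

-- the grouping fold: getD after the per-row append loop
theorem pvGetD_group {β : Type} (ss : List (String × Int × Int)) (g : String × Int × Int → β)
    (d : PySem.Dict String (List β)) (c : String) :
    (ss.foldl (fun d x => d.modify x.1 [] (fun l => l ++ [g x])) d).getD c []
      = d.getD c [] ++ (ss.filter (fun x => x.1 == c)).map g := by
  have h := PySem.Dict.getD_foldl_modify_append (l := ss.map (fun x => (x.1, g x))) (d := d) (c := c)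
  simpa [List.foldl_map, List.filter_map, Function.comp, List.map_map] using h

-- the labelled rows of one chromosome are its (b, e) pairs mapped under a constant label
theorem pvMapLabel (ss : List (String × Int × Int)) (c : String) (sep : Bool) :
    (ss.filter (fun x => x.1 == c)).map (fun x => (pvLabel sep x.1, x.2.1, x.2.2))
      = ((ss.filter (fun x => x.1 == c)).map (fun x => x.2)).map (fun q => (pvLabel sep c, q.1, q.2)) := by
  rw [List.map_map]
  apply List.map_congr_left
  intro x hx
  have hx1 : x.1 = c := by simpa using (List.mem_filter.mp hx).2
  simp [Function.comp, hx1]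


theorem pvItems_insert_getD {β : Type} (F : String × Int → β → β) (dflt : β) :
    ∀ (lens : List (String × Int)) (d : PySem.Dict String β) (pre : List (String × β)),
    d.keys.Nodup →
    d.items = pre ++ lens.map (fun p => (p.1, dflt)) →
    (lens.foldl (fun d p => d.insert p.1 (F p (d.getD p.1 dflt))) d).items
      = pre ++ lens.map (fun p => (p.1, F p dflt)) := by
  intro lens
  induction lens with
  | nil => intro d pre _ hitems; simpa using hitems
  | cons p t ih =>
      intro d pre hnd hitems
      have hmem : (p.1, dflt) ∈ d.items := by rw [hitems]; simp
      have hkeys : d.keys = pre.map (fun q => q.1) ++ p.1 :: t.map (fun p => p.1) := by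
        simp [PySem.Dict.keys, hitems, List.map_map, Function.comp]
      have hnd2 := hnd
      rw [hkeys, List.nodup_append] at hnd2
      obtain ⟨-, hndr, hdisj⟩ := hnd2
      have hcont : d.contains p.1 = true := by
        rw [PySem.Dict.contains_eq_decide_mem_keys, hkeys]; simp
      have hget : d.getD p.1 dflt = dflt := PySem.Dict.getD_of_mem_items d hmem hnd dflt
      have hnotpre : ∀ q ∈ pre, q.1 ≠ p.1 := by
        intro q hq he
        exact hdisj q.1 (List.mem_map_of_mem hq) p.1 (by simp) he
      have hnott : ∀ r ∈ t, r.1 ≠ p.1 := by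
        intro r hr he
        exact (List.nodup_cons.mp hndr).1 (by rw [← he]; exact List.mem_map_of_mem hr)
      have e1 : List.map (fun q => if (q.1 == p.1) = true then (p.1, F p dflt) else q) pre = pre := by
        have := List.map_congr_left (l := pre)
          (f := fun q => if (q.1 == p.1) = true then (p.1, F p dflt) else q) (g := id)
          (fun q hq => by simp [hnotpre q hq])
        simpa using this
      have e3 : List.map ((fun q => if (q.1 == p.1) = true then (p.1, F p dflt) else q) ∘ (fun r : String × Int => (r.1, dflt))) t = t.map (fun r => (r.1, dflt)) := by
        apply List.map_congr_left
        intro r hr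
        simp [hnott r hr]
      have hitems' : (d.insert p.1 (F p (d.getD p.1 dflt))).items
          = (pre ++ [(p.1, F p dflt)]) ++ t.map (fun p => (p.1, dflt)) := by
        rw [PySem.Dict.items_insert_of_contains d _ hcont, hitems, hget]
        simp only [List.map_append, List.map_cons, List.map_map]
        rw [e1, e3]
        simp
      have hnd' : (d.insert p.1 (F p (d.getD p.1 dflt))).keys.Nodup := by
        rw [PySem.Dict.keys_insert_of_contains d _ hcont]; exact hnd
      simp only [List.foldl_cons]
      rw [ih _ _ hnd' hitems']
      simp

theorem pvInsertBy_map {α β : Type} (f : α → β) (bf : β → β → Bool) (bg : α → α → Bool)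
    (h : ∀ a b, bf (f a) (f b) = bg a b) (x : α) (l : List α) :
    PySem.List.insertBy bf (f x) (l.map f) = (PySem.List.insertBy bg x l).map f := by
  induction l with
  | nil => simp [PySem.List.insertBy]
  | cons y t ih =>
      simp only [List.map_cons, PySem.List.insertBy, h]
      split <;> simp [ih]

theorem pvSortFold_map (s : String) :
    ∀ (l acc : List (Int × Int)),
    (l.map (fun q => (s, q.1, q.2))).foldl
      (fun a x => PySem.List.insertBy (fun a b => decide (a.2.1 < b.2.1) || (!decide (b.2.1 < a.2.1) && decide (a.2.2 < b.2.2))) x a)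
      (acc.map (fun q => (s, q.1, q.2)))
    = (l.foldl (fun a x => PySem.List.insertBy (fun a b => decide (a.1 < b.1) || (!decide (b.1 < a.1) && decide (a.2 < b.2))) x a) acc).map (fun q => (s, q.1, q.2)) := by
  intro l
  induction l with
  | nil => intro acc; rfl
  | cons q t ih =>
      intro acc
      simp only [List.map_cons, List.foldl_cons]
      rw [pvInsertBy_map (fun q : Int × Int => (s, q.1, q.2)) _ _ (fun a b => rfl) q acc]
      exact ih _

theorem pvSorted2_map_ctx (l : List (Int × Int)) (s : String) :
    PySem.List.sorted2 (l.map (fun q => (s, q.1, q.2))) (fun x => x.2.1) (fun x => x.2.2)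
      = (PySem.List.sorted2 l (fun q => q.1) (fun q => q.2)).map (fun q => (s, q.1, q.2)) := by
  simp only [PySem.List.sorted2, Bool.false_eq_true, if_false]
  exact pvSortFold_map s l []

theorem pvFillB_snoc (ctx : String) (ms : List (Int × Int)) (q : Int × Int) :
    pvFillB ctx (ms ++ [q])
      = ((pvFillB ctx ms).1 ++ (if (pvFillB ctx ms).2 < q.1 then [("__B", (pvFillB ctx ms).2, q.1)] else [])
          ++ [(ctx, q.1, q.2)], q.2) := by
  simp [pvFillB, List.foldl_append]

theorem pvStep_eq (ctx : String) (ms : List (Int × Int)) (qb qe : Int) (hq : 0 ≤ qb) :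
    pvFillStep (pvFillB ctx ms).1 (ctx, qb, qe) = (pvFillB ctx (pvMergeStep ms (qb, qe))).1 := by
  rcases List.eq_nil_or_concat ms with rfl | ⟨ms', p, rfl⟩
  · -- empty chromosome so far
    rw [pvMergeStep]
    simp only [List.getLast?_nil, List.nil_append]
    by_cases hb : qb = 0
    · simp [hb, pvFillStep, pvFillB]
    · have hpos : (0:Int) < qb := lt_of_le_of_ne hq (Ne.symm hb)
      simp [pvFillStep, pvFillB, hb, hpos]
  · obtain ⟨pb, pe⟩ := p
    simp only [List.concat_eq_append]
    have hlast : (ms' ++ [(pb, pe)]).getLast? = some (pb, pe) := by simp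
    have hfill := pvFillB_snoc ctx ms' (pb, pe)
    have hfl : (pvFillB ctx (ms' ++ [(pb, pe)])).1.getLast? = some (ctx, pb, pe) := by
      rw [hfill]; simp
    rw [pvMergeStep, hlast]
    by_cases hle : qb ≤ pe
    · -- merge case
      simp only [hle, if_pos]
      rw [List.dropLast_concat]
      rw [pvFillB_snoc ctx ms' (pb, max pe qe)]
      rw [pvFillStep, hfl]
      have hnlt : ¬ pe < qb := not_lt.mpr hle
      simp only [hnlt, if_false]
      have h2 : ¬ (pe = qb ∧ ctx ≠ ctx) := by simp
      simp only [h2, if_false]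
      simp only [hle, and_true, if_pos]
      rw [hfill]
      simp [List.dropLast_concat]
    · -- gap case
      simp only [hle, if_false]
      rw [pvFillB_snoc ctx (ms' ++ [(pb, pe)]) (qb, qe)]
      rw [pvFillStep, hfl]
      have hlt : pe < qb := not_le.mp hle
      have hpos : (pvFillB ctx (ms' ++ [(pb, pe)])).2 = pe := by rw [hfill]
      simp [hlt, hpos]

theorem pvMerge_ends (L : Int) (ms : List (Int × Int)) (q : Int × Int)
    (h : ∀ r ∈ ms, r.2 ≤ L) (hq : q.2 ≤ L) : ∀ r ∈ pvMergeStep ms q, r.2 ≤ L := by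
  rw [pvMergeStep]
  cases hms : ms.getLast? with
  | none => simp only [hms]
            intro r hr; rcases List.mem_append.mp hr with h1 | h1
            · exact h r h1
            · simp at h1; subst h1; exact hq
  | some p =>
      obtain ⟨pb, pe⟩ := p
      have hpm : (pb, pe) ∈ ms := List.mem_of_getLast? hms
      simp only [hms]
      split
      · intro r hr
        rcases List.mem_append.mp hr with h1 | h1
        · exact h r (List.Sublist.mem h1 (List.dropLast_sublist _))
        · simp at h1; subst h1
          simp only [max_le_iff]
          exact ⟨h _ hpm, hq⟩
      · intro r hr
        rcases List.mem_append.mp hr with h1 | h1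
        · exact h r h1
        · simp at h1; subst h1; exact hq

theorem pvChrom_loop (ctx : String) (L : Int) :
    ∀ (s : List (Int × Int)) (ms : List (Int × Int)),
    (∀ q ∈ s, 0 ≤ q.1 ∧ q.2 ≤ L) →
    (∀ q ∈ ms, q.2 ≤ L) →
    (s.foldl (fun a q => pvFillStep a (ctx, q.1, q.2)) (pvFillB ctx ms).1
        = (pvFillB ctx (s.foldl pvMergeStep ms)).1)
      ∧ (∀ q ∈ s.foldl pvMergeStep ms, q.2 ≤ L) := by
  intro s
  induction s with
  | nil => intro ms _ hms; exact ⟨rfl, hms⟩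
  | cons q t ih =>
      intro ms hs hms
      obtain ⟨qb, qe⟩ := q
      have hq := hs (qb, qe) (by simp)
      simp only [List.foldl_cons]
      rw [pvStep_eq ctx ms qb qe hq.1]
      exact ih (pvMergeStep ms (qb, qe)) (fun r hr => hs r (by simp [hr]))
        (pvMerge_ends L ms (qb, qe) hms hq.2)

theorem pvChrom_eq (ctx : String) (L : Int) (pairs : List (Int × Int))
    (h : ∀ q ∈ pairs, 0 ≤ q.1 ∧ q.2 ≤ L) :
    pvFillFin ((PySem.List.sorted2 (pairs.map (fun q => (ctx, q.1, q.2))) (fun x => x.2.1) (fun x => x.2.2)).foldl pvFillStep []) L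
      = pvChromB ctx L pairs := by
  rw [pvSorted2_map_ctx, List.foldl_map]
  set s := PySem.List.sorted2 pairs (fun q => q.1) (fun q => q.2) with hsdef
  have hsmem : ∀ q ∈ s, 0 ≤ q.1 ∧ q.2 ≤ L := by
    intro q hq
    exact h q ((PySem.List.sorted2_perm pairs _ _ false).mem_iff.mp (hsdef ▸ hq))
  have main := pvChrom_loop ctx L s [] hsmem (by simp)
  rw [show ([] : List (String × Int × Int)) = (pvFillB ctx []).1 from rfl, main.1]
  rcases List.eq_nil_or_concat (s.foldl pvMergeStep []) with hm | ⟨ms', p, hm⟩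
  · rw [pvChromB, hm]
    simp [pvFillFin, pvFillB]
  · obtain ⟨pb, pe⟩ := p
    simp only [List.concat_eq_append] at hm
    have hpe : pe ≤ L := main.2 (pb, pe) (by rw [hm]; simp)
    have hfill := pvFillB_snoc ctx ms' (pb, pe)
    have hfl : (pvFillB ctx (ms' ++ [(pb, pe)])).1.getLast? = some (ctx, pb, pe) := by
      rw [hfill]; simp
    have hsnd : (pvFillB ctx (ms' ++ [(pb, pe)])).2 = pe := by rw [hfill]
    rw [pvChromB, hm]
    rw [pvFillFin, hfl]
    simp only [hsnd, List.append_ne_nil_of_right_ne_nil, List.isEmpty_eq_false_iff, List.isEmpty_iff]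
    have hne : ms' ++ [(pb, pe)] ≠ [] := by simp
    simp only [List.isEmpty_iff, hne, or_false]
    by_cases hlt : pe < L
    · simp [hlt]
    · have : pe = L := le_antisymm hpe (not_lt.mp hlt)
      simp [hlt, this]


theorem pvInitD_nodup {β : Type} (lens : List (String × Int)) :
    (lens.foldl (fun d p => d.insert p.1 ([] : List β)) PySem.Dict.empty).keys.Nodup :=
  PySem.Dict.nodup_keys_foldl_insert_key lens (fun p => p.1) (fun _ _ => []) _ PySem.Dict.nodup_keys_empty

theorem pvInitD_items {β : Type} (lens : List (String × Int))
    (h : (lens.map (fun p => p.1)).Nodup) :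
    (lens.foldl (fun d p => d.insert p.1 ([] : List β)) PySem.Dict.empty).items
      = lens.map (fun p => (p.1, ([] : List β))) := by
  have := PySem.Dict.items_foldl_insert_fresh (l := lens) (k := fun p => p.1) (v := fun _ => ([] : List β))
    (d := PySem.Dict.empty) (by intro a _; exact PySem.Dict.contains_empty _) h
  simpa using this



-- A's port, flattened into a per-chromosome map
set_option maxHeartbeats 1600000 in
theorem pvPortA (ss : List (String × Int × Int)) (lens : List (String × Int)) (sep : Bool)
    (hnodup : (lens.map (fun p => p.1)).Nodup) :
    create_context_from_superset ss lens sep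
      = lens.map (fun p => (p.1,
          pvFillFin ((PySem.List.sorted2
            ((ss.filter (fun x => x.1 == p.1)).map (fun x => (pvLabel sep x.1, x.2.1, x.2.2)))
            (fun x => x.2.1) (fun x => x.2.2)).foldl pvFillStep []) p.2)) := by
  simp only [create_context_from_superset]
  have hget : ∀ c, ((ss.foldl (fun d x => d.modify x.1 [] (fun l => l ++ [(pvLabel sep x.1, x.2.1, x.2.2)]))
        (lens.foldl (fun d p => d.insert p.1 []) PySem.Dict.empty))).getD c []
      = (ss.filter (fun x => x.1 == c)).map (fun x => (pvLabel sep x.1, x.2.1, x.2.2)) := by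
    intro c
    rw [pvGetD_group, pvGetD_init lens PySem.Dict.empty c (by simp)]
    simp
  refine (pvItems_insert_getD
      (fun p acc => pvFillFin ((PySem.List.sorted2
        (((ss.foldl (fun d x => d.modify x.1 [] (fun l => l ++ [(pvLabel sep x.1, x.2.1, x.2.2)]))
          (lens.foldl (fun d p => d.insert p.1 []) PySem.Dict.empty))).getD p.1 [])
        (fun x => x.2.1) (fun x => x.2.2)).foldl pvFillStep acc) p.2)
      [] lens _ [] (pvInitD_nodup lens)
      (by simpa using pvInitD_items lens hnodup)).trans ?_
  simp only [List.nil_append]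
  apply List.map_congr_left
  intro p _
  rw [hget]

-- B's port, flattened into a per-chromosome map
set_option maxHeartbeats 1600000 in
theorem pvPortB (ss : List (String × Int × Int)) (lens : List (String × Int)) (sep : Bool)
    (hnodup : (lens.map (fun p => p.1)).Nodup) :
    create_context_from_superset_alt ss lens sep
      = lens.map (fun p => (p.1,
          pvChromB (pvLabel sep p.1) p.2 ((ss.filter (fun x => x.1 == p.1)).map (fun x => x.2)))) := by
  simp only [create_context_from_superset_alt]
  have hget : ∀ c, ((ss.foldl (fun d x => d.modify x.1 [] (fun l => l ++ [x.2]))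
        (lens.foldl (fun d p => d.insert p.1 []) PySem.Dict.empty))).getD c []
      = (ss.filter (fun x => x.1 == c)).map (fun x => x.2) := by
    intro c
    rw [pvGetD_group, pvGetD_init lens PySem.Dict.empty c (by simp)]
    simp
  simp only [hget]
  have h2 := PySem.Dict.items_foldl_insert_fresh lens (fun p : String × Int => p.1)
      (fun p : String × Int => pvChromB (pvLabel sep p.1) p.2 ((ss.filter (fun x => x.1 == p.1)).map (fun x => x.2)))
      (PySem.Dict.empty (κ := String) (ν := List (String × Int × Int)))
      (fun a _ => PySem.Dict.contains_empty _) hnodup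
  simpa using h2

-- ===== VERDICT (by name: the statement is the Claim_ definition above) =====
theorem create_context_from_superset_spec : Claim_equal_create_context_from_superset := by
  intro ss lens sep _ hpre
  obtain ⟨hnodup, hss⟩ := hpre
  unfold Spec_create_context_from_superset
  rw [pvPortA ss lens sep hnodup, pvPortB ss lens sep hnodup]
  apply List.map_congr_left
  intro p hp
  have hb : ∀ q ∈ (ss.filter (fun x => x.1 == p.1)).map (fun x => x.2),
      0 ≤ q.1 ∧ q.2 ≤ p.2 := by
    intro q hq
    obtain ⟨x, hxf, rfl⟩ := List.mem_map.mp hq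
    have hxs : x ∈ ss := (List.mem_filter.mp hxf).1
    have hx1 : x.1 = p.1 := by simpa using (List.mem_filter.mp hxf).2
    have h := hss x hxs
    exact ⟨h.2.1, h.2.2 p hp hx1.symm⟩
  rw [pvMapLabel ss p.1 sep]
  rw [pvChrom_eq (pvLabel sep p.1) p.2 _ hb]
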